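-- pv_equiv track=rewrite | github.com/johnddouglass/transient-snap | diag_remaining.py | match_notes
-- ===== SOURCE A (Python) =====
-- SR = 48000
--
-- def match_notes(orig_pos, ref_pos, window=int(0.020 * SR)):
--     used, pairs = set(), []
--     for op in sorted(orig_pos):
--         best_i, best_d = None, window + 1
--         for i, rp in enumerate(ref_pos):
--             if i in used: continue
--             d = abs(op - rp)
--             if d < best_d: best_d, best_i = d, i
--         if best_i is not None and best_d <= window:
--             pairs.append((op, ref_pos[best_i])); used.add(best_i)
--     return pairs
-- ===== SOURCE B (Python) =====
-- SR = 48000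
--
-- def match_notes(orig_pos, ref_pos, window=int(0.020 * SR)):
--     # Greedy nearest match, but keep a shrinking pool of unmatched ref values
--     # (min with key + remove) instead of index bookkeeping with a used set.
--     remaining = list(ref_pos)
--     pairs = []
--     for op in sorted(orig_pos):
--         rp = min(remaining, key=lambda r: abs(op - r), default=None)
--         if rp is not None and abs(op - rp) <= window:
--             pairs.append((op, rp))
--             remaining.remove(rp)
--     return pairs
-- ===== Notes on version B (the rewrite author's own statement) =====
-- stated objective: simpler
-- what changed: A tracks matched refs with a used-index set and a hand-rolled inner argmin loop over enumerate(ref_pos); B instead keeps a shrinking pool of unmatched ref values and consumes it with builtin min(key=...) plus remove, so all index bookkeeping disappears.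
import Mathlib
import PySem

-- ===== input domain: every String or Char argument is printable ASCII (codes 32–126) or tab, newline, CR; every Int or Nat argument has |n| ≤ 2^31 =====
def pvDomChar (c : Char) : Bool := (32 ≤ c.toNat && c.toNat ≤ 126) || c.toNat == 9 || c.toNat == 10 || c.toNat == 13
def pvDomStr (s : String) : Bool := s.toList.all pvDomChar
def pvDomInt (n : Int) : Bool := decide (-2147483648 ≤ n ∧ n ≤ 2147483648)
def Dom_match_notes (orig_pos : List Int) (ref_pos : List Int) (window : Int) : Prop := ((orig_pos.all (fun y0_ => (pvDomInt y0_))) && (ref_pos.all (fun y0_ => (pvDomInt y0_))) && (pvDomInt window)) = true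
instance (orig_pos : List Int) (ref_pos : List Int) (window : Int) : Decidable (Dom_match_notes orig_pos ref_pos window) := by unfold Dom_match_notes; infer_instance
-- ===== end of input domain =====

-- B replaces A's used-index set and hand-rolled inner argmin loop by a shrinking pool of
-- unmatched ref values consumed with min(key=…) + remove (simpler; same greedy result).

-- ===== PORT A =====
def match_notes (orig_pos : List Int) (ref_pos : List Int) (window : Int) : List (Int × Int) :=
  (((PySem.List.sorted orig_pos (fun x => x) false).foldl
    (fun (st : PySem.Set Int × List (Int × Int)) (op : Int) =>
      let best := (PySem.List.enumerate ref_pos).foldl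
        (fun (b : Option Int × Int) (p : Int × Int) =>
          if st.1.contains p.1 then b
          else
            let d := |op - p.2|
            if d < b.2 then (some p.1, d) else b)
        (none, window + 1)
      match best.1 with
      | some bi =>
          if best.2 ≤ window then
            -- ref_pos[best_i]: best_i comes from enumerate, always in range
            (st.1.add bi, st.2 ++ [(op, PySem.List.pyGetD ref_pos bi 0)])
          else st
      | none => st)
    (PySem.Set.empty, [])).2)

-- ===== PORT B =====
def match_notes_alt (orig_pos : List Int) (ref_pos : List Int) (window : Int) : List (Int × Int) :=
  (((PySem.List.sorted orig_pos (fun x => x) false).foldl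
    (fun (st : List Int × List (Int × Int)) (op : Int) =>
      match PySem.List.min? st.1 (fun r => |op - r|) with
      | some rp =>
          if |op - rp| ≤ window then
            -- remaining.remove(rp): rp ∈ remaining (it came from min), so remove? is some
            ((PySem.List.remove? st.1 rp).getD st.1, st.2 ++ [(op, rp)])
          else st
      | none => st)
    (ref_pos, [])).2)

-- ===== PRECONDITION & SPEC =====
def Spec_match_notes (orig_pos : List Int) (ref_pos : List Int) (window : Int) (out : List (Int × Int)) : Prop := out = match_notes_alt orig_pos ref_pos window
instance (orig_pos : List Int) (ref_pos : List Int) (window : Int) (out : List (Int × Int)) : Decidable (Spec_match_notes orig_pos ref_pos window out) := by unfold Spec_match_notes; infer_instance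

-- ===== CLAIM (what is proved, stated in full; the proofs are below) =====
def Claim_equal_match_notes : Prop := ∀ (orig_pos : List Int) (ref_pos : List Int) (window : Int), Dom_match_notes orig_pos ref_pos window → Spec_match_notes orig_pos ref_pos window (match_notes orig_pos ref_pos window)

-- ===== LEMMAS AND PROOFS =====

/-- First arg-min (ties keep the earlier element) of a list under an integer key. -/
def fam {α : Type} (k : α → Int) : List α → Option α
  | [] => none
  | x :: t =>
    match fam k t with
    | none => some x
    | some q => if k q < k x then some q else some x

def minStep {α : Type} (k : α → Int) (acc : Option α) (x : α) : Option α :=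
  match acc with
  | none => some x
  | some m => if k x < k m then some x else some m

theorem min?_foldl_some {α : Type} (k : α → Int) (t : List α) (m : α) :
    t.foldl (minStep k) (some m)
      = some (match fam k t with | none => m | some q => if k q < k m then q else m) := by
  induction t generalizing m with
  | nil => simp [fam]
  | cons y t ih =>
    have hstep : minStep k (some m) y = some (if k y < k m then y else m) := by
      simp only [minStep]; split_ifs <;> rfl
    rw [List.foldl_cons, hstep, ih]
    cases hq : fam k t with
    | none =>
      simp only [fam, hq]
    | some q =>
      simp only [fam, hq]
      by_cases h2 : k q < k y
      · rw [if_pos h2]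
        try dsimp only
        split_ifs <;> first | rfl | omega
      · rw [if_neg h2]
        try dsimp only
        split_ifs <;> first | rfl | omega

theorem min?_eq_fam {α : Type} (k : α → Int) (L : List α) :
    PySem.List.min? L k = fam k L := by
  have hc : PySem.List.min? L k = L.foldl (minStep k) none := by
    simp only [PySem.List.min?]
    apply PySem.List.foldl_congr_mem
    intro acc x _
    cases acc <;> rfl
  cases L with
  | nil => simp [hc, fam]
  | cons x t =>
    rw [hc, List.foldl_cons]
    have : minStep k none x = some x := rfl
    rw [this, min?_foldl_some k t x]
    simp only [fam]
    cases hq : fam k t with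
    | none => rfl
    | some q => dsimp only; split_ifs <;> rfl

theorem fam_map_snd (op : Int) (L : List (Int × Int)) :
    fam (fun r => |op - r|) (L.map Prod.snd) = (fam (fun p => |op - p.2|) L).map Prod.snd := by
  induction L with
  | nil => rfl
  | cons x t ih =>
    simp only [List.map_cons, fam, ih]
    cases fam (fun p => |op - p.2|) t <;> simp <;> split <;> simp

theorem foldA_char (op : Int) (L : List (Int × Int)) (io : Option Int) (d0 : Int) :
    L.foldl (fun (b : Option Int × Int) (p : Int × Int) =>
        if |op - p.2| < b.2 then (some p.1, |op - p.2|) else b) (io, d0)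
      = (match fam (fun p => |op - p.2|) L with
        | none => (io, d0)
        | some p => if |op - p.2| < d0 then (some p.1, |op - p.2|) else (io, d0)) := by
  induction L generalizing io d0 with
  | nil => rfl
  | cons x t ih =>
    rw [List.foldl_cons]
    dsimp only
    rw [ih]
    cases hq : fam (fun p => |op - p.2|) t with
    | none =>
      simp only [fam, hq]
    | some q =>
      simp only [fam, hq]
      by_cases h2 : |op - q.2| < |op - x.2|
      · rw [if_pos h2]
        try dsimp only
        split_ifs <;> first | rfl | omega
      · rw [if_neg h2]
        try dsimp only
        split_ifs <;> first | rfl | omega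

theorem fam_decomp {α : Type} (k : α → Int) (L : List α) (p : α) (h : fam k L = some p) :
    ∃ l1 l2, L = l1 ++ p :: l2 ∧ ∀ q ∈ l1, k p < k q := by
  induction L with
  | nil => simp [fam] at h
  | cons x t ih =>
    simp only [fam] at h
    cases hq : fam k t with
    | none =>
      rw [hq] at h
      dsimp only at h
      obtain rfl : x = p := by simpa using h
      exact ⟨[], t, rfl, by simp⟩
    | some q =>
      rw [hq] at h
      dsimp only at h
      by_cases hlt : k q < k x
      · rw [if_pos hlt] at h
        obtain rfl : q = p := by simpa using h
        obtain ⟨l1, l2, he, hall⟩ := ih hq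
        exact ⟨x :: l1, l2, by simp [he], by
          intro r hr
          rcases List.mem_cons.1 hr with rfl | hr
          · exact hlt
          · exact hall r hr⟩
      · rw [if_neg hlt] at h
        obtain rfl : x = p := by simpa using h
        exact ⟨[], t, rfl, by simp⟩

theorem remove?_first {α : Type} [BEq α] [LawfulBEq α] (a b : List α) (v : α) (hv : v ∉ a) :
    PySem.List.remove? (a ++ v :: b) v = some (a ++ b) := by
  induction a with
  | nil => simp
  | cons x a ih =>
    have hx : x ≠ v := fun h => hv (h ▸ List.mem_cons_self)
    have ha : v ∉ a := fun h => hv (List.mem_cons_of_mem _ h)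
    simp only [List.cons_append, PySem.List.remove?_cons_of_ne _ hx, ih ha, Option.map_some]

theorem contains_add_int (u : PySem.Set Int) (i j : Int) :
    (PySem.Set.add u i).contains j = (u.contains j || j == i) := by
  by_cases h : j ∈ PySem.Set.add u i
  · have e0 : (PySem.Set.add u i).contains j = true := (PySem.Set.contains_iff _ _).2 h
    rcases (PySem.Set.mem_add u i j).1 h with h2 | h2
    · have e1 : u.contains j = true := (PySem.Set.contains_iff u j).2 h2
      rw [e0, e1, Bool.true_or]
    · subst h2
      rw [e0, beq_self_eq_true, Bool.or_true]
  · have h1 : j ∉ u := fun hj => h ((PySem.Set.mem_add u i j).2 (Or.inl hj))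
    have h2 : j ≠ i := fun hj => h ((PySem.Set.mem_add u i j).2 (Or.inr hj))
    have e1 : (PySem.Set.add u i).contains j = false := by
      cases hc : (PySem.Set.add u i).contains j
      · rfl
      · exact absurd ((PySem.Set.contains_iff _ _).1 hc) h
    have e2 : u.contains j = false := by
      cases hc : u.contains j
      · rfl
      · exact absurd ((PySem.Set.contains_iff _ _).1 hc) h1
    rw [e1, e2, Bool.false_or]
    exact (beq_eq_false_iff_ne.2 h2).symm

theorem filter_ne_of_pairwise (l1 l2 : List (Int × Int)) (p : Int × Int)
    (hp : (l1 ++ p :: l2).Pairwise (fun a b => a.1 < b.1)) :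
    (l1 ++ p :: l2).filter (fun q => !(q.1 == p.1)) = l1 ++ l2 := by
  rw [List.pairwise_append] at hp
  obtain ⟨h1, h2, h12⟩ := hp
  rw [List.pairwise_cons] at h2
  rw [List.filter_append, List.filter_cons]
  have e1 : l1.filter (fun q => !(q.1 == p.1)) = l1 := by
    apply List.filter_eq_self.2
    intro q hq
    have : q.1 < p.1 := h12 q hq p List.mem_cons_self
    simp; omega
  have e2 : l2.filter (fun q => !(q.1 == p.1)) = l2 := by
    apply List.filter_eq_self.2
    intro q hq
    have : p.1 < q.1 := h2.1 q hq
    simp; omega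
  simp [e1, e2]

theorem fam_mem {α : Type} (k : α → Int) (L : List α) (p : α) (h : fam k L = some p) :
    p ∈ L := by
  obtain ⟨l1, l2, he, -⟩ := fam_decomp k L p h
  rw [he]; exact List.mem_append_right _ List.mem_cons_self

/-- One step of the two loops agree, and B's remaining pool stays the snd-projection of
    the unused part of the enumerated ref list. -/
theorem loop_eq (ops : List Int) (ref_pos : List Int) (window : Int) :
    ∀ (u : PySem.Set Int) (pr : List (Int × Int)),
    (ops.foldl
      (fun (st : PySem.Set Int × List (Int × Int)) (op : Int) =>
        let best := (PySem.List.enumerate ref_pos).foldl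
          (fun (b : Option Int × Int) (p : Int × Int) =>
            if st.1.contains p.1 then b
            else
              let d := |op - p.2|
              if d < b.2 then (some p.1, d) else b)
          (none, window + 1)
        match best.1 with
        | some bi =>
            if best.2 ≤ window then
              (st.1.add bi, st.2 ++ [(op, PySem.List.pyGetD ref_pos bi 0)])
            else st
        | none => st)
      (u, pr)).2
    =
    (ops.foldl
      (fun (st : List Int × List (Int × Int)) (op : Int) =>
        match PySem.List.min? st.1 (fun r => |op - r|) with
        | some rp =>
            if |op - rp| ≤ window then
              ((PySem.List.remove? st.1 rp).getD st.1, st.2 ++ [(op, rp)])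
            else st
        | none => st)
      ((((PySem.List.enumerate ref_pos).filter (fun q => !u.contains q.1)).map Prod.snd), pr)).2 := by
  induction ops with
  | nil => intro u pr; rfl
  | cons op ops ih =>
    intro u pr
    rw [List.foldl_cons, List.foldl_cons]
    dsimp only
    -- A's inner scan over enumerate with the used test = scan over the unused sublist
    have hcongr :
        (PySem.List.enumerate ref_pos).foldl
          (fun (b : Option Int × Int) (p : Int × Int) =>
            if u.contains p.1 then b
            else
              let d := |op - p.2|
              if d < b.2 then (some p.1, d) else b)
          (none, window + 1)
        = ((PySem.List.enumerate ref_pos).filter (fun q => !u.contains q.1)).foldl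
            (fun (b : Option Int × Int) (p : Int × Int) =>
              if |op - p.2| < b.2 then (some p.1, |op - p.2|) else b)
            (none, window + 1) := by
      have hfun : (fun (b : Option Int × Int) (p : Int × Int) =>
            if u.contains p.1 then b
            else
              let d := |op - p.2|
              if d < b.2 then (some p.1, d) else b)
          = fun (b : Option Int × Int) (p : Int × Int) =>
              if (!u.contains p.1) then
                (if |op - p.2| < b.2 then (some p.1, |op - p.2|) else b)
              else b := by
        funext b p
        cases hc : u.contains p.1 <;> simp [hc]
      rw [hfun, PySem.List.foldl_if_eq_foldl_filter]
    rw [hcongr, foldA_char]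
    set L := (PySem.List.enumerate ref_pos).filter (fun q => !u.contains q.1) with hLdef
    have hmin : PySem.List.min? (L.map Prod.snd) (fun r => |op - r|)
        = (fam (fun p => |op - p.2|) L).map Prod.snd := by
      rw [min?_eq_fam, fam_map_snd]
    cases hf : fam (fun p => |op - p.2|) L with
    | none =>
      rw [hf, Option.map_none] at hmin
      rw [hmin]
      dsimp only
      exact ih u pr
    | some p =>
      rw [hf, Option.map_some] at hmin
      rw [hmin]
      dsimp only
      obtain ⟨l1, l2, hL, hl1⟩ := fam_decomp _ L p hf
      have hpmem : p ∈ L := fam_mem _ L p hf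
      have henum : p ∈ PySem.List.enumerate ref_pos := (List.mem_filter.1 hpmem).1
      have hget : PySem.List.pyGetD ref_pos p.1 0 = p.2 := by
        obtain ⟨j, hj, hp⟩ := (PySem.List.mem_enumerate_iff ref_pos 0 p).1 henum
        rw [hp]
        simp [PySem.List.pyGetD_natCast, List.getD_eq_getElem?_getD, List.getElem?_eq_getElem hj]
      by_cases hw : |op - p.2| ≤ window
      · -- a match is made on both sides
        have hlt : |op - p.2| < window + 1 := by omega
        have hnot : p.2 ∉ l1.map Prod.snd := by
          intro hmem
          obtain ⟨q, hq, hqe⟩ := List.mem_map.1 hmem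
          have := hl1 q hq
          rw [hqe] at this
          omega
        have hrem : PySem.List.remove? (L.map Prod.snd) p.2
            = some (l1.map Prod.snd ++ l2.map Prod.snd) := by
          rw [hL, List.map_append, List.map_cons]
          exact remove?_first _ _ _ hnot
        have hpair : L.Pairwise (fun a b : Int × Int => a.1 < b.1) :=
          (PySem.List.pairwise_lt_enumerate ref_pos 0).filter _
        have hfilter : (PySem.List.enumerate ref_pos).filter
            (fun q => !(u.add p.1).contains q.1) = l1 ++ l2 := by
          have h1 : (PySem.List.enumerate ref_pos).filter
              (fun q => !(u.add p.1).contains q.1)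
              = L.filter (fun q => !(q.1 == p.1)) := by
            rw [hLdef, List.filter_filter]
            apply List.filter_congr
            intro q _
            rw [contains_add_int, Bool.not_or, Bool.and_comm]
          rw [h1, hL]
          exact filter_ne_of_pairwise l1 l2 p (hL ▸ hpair)
        have hIH := ih (u.add p.1) (pr ++ [(op, p.2)])
        rw [hfilter, List.map_append] at hIH
        simp only [hlt, if_true, hw, hget, hrem, Option.getD_some]
        exact hIH
      · -- too far: both sides skip
        have hlt : ¬ (|op - p.2| < window + 1) := by omega
        simp only [hlt, if_false, hw]
        exact ih u pr

-- ===== VERDICT (by name: the statement is the Claim_ definition above) =====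
theorem match_notes_spec : Claim_equal_match_notes := by
  intro orig_pos ref_pos window _
  unfold Spec_match_notes match_notes match_notes_alt
  have h := loop_eq (PySem.List.sorted orig_pos (fun x => x) false) ref_pos window PySem.Set.empty []
  rw [h]
  congr 2
  have : (PySem.List.enumerate ref_pos).filter (fun q => !(PySem.Set.empty (α := Int)).contains q.1)
      = PySem.List.enumerate ref_pos := by
    apply List.filter_eq_self.2
    intro q _
    rfl
  rw [this, PySem.List.map_snd_enumerate]
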